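-- pv_equiv track=rewrite | github.com/predicted-response-decoding/individual-difference-analysis | manteltest.py | n_comb2n
-- ===== SOURCE A (Python) =====
-- def n_comb2n(n_comb):
--     """
--     Get number of subjects from number of subject pairs
--     """
--     s = 1
--     t = 2 ** 18
--     while s != t:
--         m = (s + t) // 2
--         m_comb = m * (m - 1) // 2
--         if m_comb < n_comb: s = m + 1
--         elif n_comb <= m_comb: t = m
--
--     return s
-- ===== SOURCE B (Python) =====
-- def _isqrt(n):
--     # Newton's method: exact integer square root for n >= 1
--     x = n
--     while True:
--         y = (x + n // x) // 2
--         if y >= x: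
--             return x
--         x = y
--
-- def n_comb2n(n_comb):
--     """
--     Get number of subjects from number of subject pairs
--     """
--     if n_comb <= 0:
--         return 1
--     n = (1 + _isqrt(8 * n_comb - 7)) // 2
--     while n * (n - 1) // 2 < n_comb:
--         n += 1
--     while n > 1 and (n - 2) * (n - 1) // 2 >= n_comb:
--         n -= 1
--     return n
-- ===== Notes on version B (the rewrite author's own statement) =====
-- stated objective: alternative
-- what changed: Replaces the fixed-range binary search with a closed-form Newton integer square root plus constant-step rounding-adjustment loops.
import Mathlib
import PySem

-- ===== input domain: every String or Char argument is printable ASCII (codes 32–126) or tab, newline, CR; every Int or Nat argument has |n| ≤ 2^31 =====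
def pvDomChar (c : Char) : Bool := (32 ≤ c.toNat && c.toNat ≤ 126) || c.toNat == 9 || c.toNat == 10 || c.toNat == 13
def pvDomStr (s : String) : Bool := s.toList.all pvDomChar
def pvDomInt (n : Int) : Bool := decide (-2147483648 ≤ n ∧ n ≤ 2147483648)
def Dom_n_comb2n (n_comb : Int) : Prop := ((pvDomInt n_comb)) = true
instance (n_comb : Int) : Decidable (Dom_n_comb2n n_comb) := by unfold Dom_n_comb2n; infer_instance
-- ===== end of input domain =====

-- B replaces A's fixed-range binary search by a Newton integer square root plus rounding
-- adjustment loops (objective: alternative algorithm of similar cost).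
-- Each Python while loop is ported as structural recursion on a Nat bound that provably
-- exceeds the loop's iteration count, so the recursion mirrors the loop body step for step.

-- ===== PORT A =====
-- the while loop of A, state (s, t); fuel ≥ t - s bounds the iteration count
def n_comb2n_loop (k : Int) : Nat → Int → Int → Int
  | 0, s, _ => s
  | fuel + 1, s, t =>
    if s = t then s
    else
      let m := PySem.Int.floordiv (s + t) 2
      if PySem.Int.floordiv (m * (m - 1)) 2 < k then
        n_comb2n_loop k fuel (m + 1) t
      else
        n_comb2n_loop k fuel s m

def n_comb2n (n_comb : Int) : Int :=
  n_comb2n_loop n_comb 262143 1 262144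

-- ===== PORT B =====
-- the Newton iteration of Source B's _isqrt; from x the next value is smaller, so x.toNat
-- bounds the remaining iterations
def pv_isqrt_loop (n : Int) : Nat → Int → Int
  | 0, x => x
  | fuel + 1, x =>
    let y := PySem.Int.floordiv (x + PySem.Int.floordiv n x) 2
    if x ≤ y then x
    else pv_isqrt_loop n fuel y

def pv_isqrt (n : Int) : Int := pv_isqrt_loop n n.toNat n

-- first while loop of B: increase n while n*(n-1)//2 < n_comb (at most n_comb steps)
def pv_up (k : Int) : Nat → Int → Int
  | 0, n => n
  | fuel + 1, n =>
    if PySem.Int.floordiv (n * (n - 1)) 2 < k then pv_up k fuel (n + 1)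
    else n

-- second while loop of B: decrease n while n > 1 and (n-2)*(n-1)//2 >= n_comb
def pv_down (k : Int) : Nat → Int → Int
  | 0, n => n
  | fuel + 1, n =>
    if 1 < n ∧ k ≤ PySem.Int.floordiv ((n - 2) * (n - 1)) 2 then pv_down k fuel (n - 1)
    else n

def n_comb2n_alt (n_comb : Int) : Int :=
  if n_comb ≤ 0 then 1
  else
    let r := pv_isqrt (8 * n_comb - 7)
    let n0 := PySem.Int.floordiv (1 + r) 2
    let n1 := pv_up n_comb n_comb.toNat n0
    pv_down n_comb n1.toNat n1

-- ===== PRECONDITION & SPEC =====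
def Spec_n_comb2n (n_comb : Int) (out : Int) : Prop := out = n_comb2n_alt n_comb
instance (n_comb : Int) (out : Int) : Decidable (Spec_n_comb2n n_comb out) := by unfold Spec_n_comb2n; infer_instance

-- ===== CLAIM (what is proved, stated in full; the proofs are below) =====
def Claim_equal_n_comb2n : Prop := ∀ (n_comb : Int), Dom_n_comb2n n_comb → Spec_n_comb2n n_comb (n_comb2n n_comb)

-- ===== LEMMAS AND PROOFS =====

theorem pv_fd2 (a : Int) : PySem.Int.floordiv a 2 = a / 2 :=
  PySem.Int.floordiv_eq_ediv_of_pos (by norm_num)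

-- "r is the answer": the least r ≥ 1 with r*(r-1)/2 ≥ k (divisions here are Int ediv = floor, the dividends being products of consecutive integers)
def GoodN (k r : Int) : Prop :=
  1 ≤ r ∧ k ≤ r * (r - 1) / 2 ∧ (r = 1 ∨ (r - 1) * (r - 2) / 2 < k)

theorem comb_mono {a b : Int} (ha : 1 ≤ a) (hab : a ≤ b) :
    a * (a - 1) / 2 ≤ b * (b - 1) / 2 := by
  have : a * (a - 1) ≤ b * (b - 1) := by nlinarith
  omega

theorem GoodN_unique {k r1 r2 : Int} (h1 : GoodN k r1) (h2 : GoodN k r2) : r1 = r2 := by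
  obtain ⟨a1, b1, c1⟩ := h1
  obtain ⟨a2, b2, c2⟩ := h2
  by_contra hne
  rcases lt_or_gt_of_ne hne with hlt | hlt
  · rcases c2 with rfl | hc
    · omega
    · have hm : r1 * (r1 - 1) / 2 ≤ (r2 - 1) * (r2 - 1 - 1) / 2 :=
        comb_mono a1 (by omega)
      have he : (r2 - 1) * (r2 - 1 - 1) = (r2 - 1) * (r2 - 2) := by ring
      omega
  · rcases c1 with rfl | hc
    · omega
    · have hm : r2 * (r2 - 1) / 2 ≤ (r1 - 1) * (r1 - 1 - 1) / 2 :=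
        comb_mono a2 (by omega)
      have he : (r1 - 1) * (r1 - 1 - 1) = (r1 - 1) * (r1 - 2) := by ring
      omega

theorem loopA_good (k : Int) : ∀ (fuel : Nat) (s t : Int), 1 ≤ s → s ≤ t →
    (t - s).toNat ≤ fuel →
    (∀ m, 1 ≤ m → m < s → m * (m - 1) / 2 < k) → k ≤ t * (t - 1) / 2 →
    GoodN k (n_comb2n_loop k fuel s t) := by
  intro fuel
  induction fuel with
  | zero =>
    intro s t hs hst hf Hlow Hhigh
    have hst' : s = t := by omega
    subst hst'
    rw [n_comb2n_loop]
    refine ⟨hs, Hhigh, ?_⟩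
    by_cases h1 : s = 1
    · left; exact h1
    · right
      have := Hlow (s - 1) (by omega) (by omega)
      have he : (s - 1) * (s - 1 - 1) = (s - 1) * (s - 2) := by ring
      omega
  | succ fuel ih =>
    intro s t hs hst hf Hlow Hhigh
    rw [n_comb2n_loop]
    by_cases h : s = t
    · rw [if_pos h]
      subst h
      refine ⟨hs, Hhigh, ?_⟩
      by_cases h1 : s = 1
      · left; exact h1
      · right
        have := Hlow (s - 1) (by omega) (by omega)
        have he : (s - 1) * (s - 1 - 1) = (s - 1) * (s - 2) := by ring
        omega
    · rw [if_neg h]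
      have hmv : PySem.Int.floordiv (s + t) 2 = (s + t) / 2 := pv_fd2 _
      by_cases hm : PySem.Int.floordiv
          (PySem.Int.floordiv (s + t) 2 * (PySem.Int.floordiv (s + t) 2 - 1)) 2 < k
      · rw [if_pos hm, hmv]
        rw [pv_fd2, hmv] at hm
        apply ih ((s + t) / 2 + 1) t (by omega) (by omega) (by omega)
        · intro m' hm1 hm2
          have hmono := comb_mono hm1 (show m' ≤ (s + t) / 2 by omega)
          omega
        · exact Hhigh
      · rw [if_neg hm, hmv]
        rw [pv_fd2, hmv] at hm
        apply ih s ((s + t) / 2) hs (by omega) (by omega) Hlow (by omega)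

theorem isqrt_loop_ge_one (n : Int) (hn : 1 ≤ n) :
    ∀ (fuel : Nat) (x : Int), 1 ≤ x → 1 ≤ pv_isqrt_loop n fuel x := by
  intro fuel
  induction fuel with
  | zero => intro x hx; rw [pv_isqrt_loop]; exact hx
  | succ fuel ih =>
    intro x hx
    rw [pv_isqrt_loop]
    by_cases h : x ≤ PySem.Int.floordiv (x + PySem.Int.floordiv n x) 2
    · rw [if_pos h]; exact hx
    · rw [if_neg h]
      apply ih
      have hfx : PySem.Int.floordiv n x = n / x :=
        PySem.Int.floordiv_eq_ediv_of_pos (by omega)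
      rw [pv_fd2, hfx]
      have hq : 0 ≤ n / x := Int.ediv_nonneg (by omega) (by omega)
      rcases eq_or_lt_of_le hx with hx1 | hx2
      · have hnx : n / x = n := by rw [← hx1]; simp
        omega
      · omega

theorem isqrt_ge_one (n : Int) (hn : 1 ≤ n) : 1 ≤ pv_isqrt n :=
  isqrt_loop_ge_one n hn n.toNat n hn

theorem pv_up_good (k : Int) : ∀ (fuel : Nat) (n : Int), 1 ≤ n →
    k ≤ (n + fuel) * (n + fuel - 1) / 2 →
    1 ≤ pv_up k fuel n ∧ k ≤ (pv_up k fuel n) * (pv_up k fuel n - 1) / 2 := by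
  intro fuel
  induction fuel with
  | zero =>
    intro n hn hf
    rw [pv_up]
    norm_num at hf
    exact ⟨hn, hf⟩
  | succ fuel ih =>
    intro n hn hf
    rw [pv_up]
    by_cases h : PySem.Int.floordiv (n * (n - 1)) 2 < k
    · rw [if_pos h]
      apply ih (n + 1) (by omega)
      have he : (n + 1 : Int) + (fuel : Int) = n + ((fuel + 1 : Nat) : Int) := by push_cast; ring
      rw [he]
      exact hf
    · rw [if_neg h]
      rw [pv_fd2] at h
      exact ⟨hn, by omega⟩

theorem pv_down_good (k : Int) : ∀ (fuel : Nat) (n : Int), 1 ≤ n →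
    k ≤ n * (n - 1) / 2 → n.toNat ≤ fuel → GoodN k (pv_down k fuel n) := by
  intro fuel
  induction fuel with
  | zero => intro n hn hk hf; omega
  | succ fuel ih =>
    intro n hn hk hf
    rw [pv_down]
    by_cases h : 1 < n ∧ k ≤ PySem.Int.floordiv ((n - 2) * (n - 1)) 2
    · rw [if_pos h]
      obtain ⟨h1, h2⟩ := h
      rw [pv_fd2] at h2
      apply ih (n - 1) (by omega) ?_ (by omega)
      have he : (n - 2) * (n - 1) = (n - 1) * (n - 1 - 1) := by ring
      rw [he] at h2
      exact h2
    · rw [if_neg h]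
      rw [pv_fd2] at h
      refine ⟨hn, hk, ?_⟩
      rcases not_and_or.mp h with h2 | h2
      · left; omega
      · right
        have he : (n - 1) * (n - 2) = (n - 2) * (n - 1) := by ring
        omega

theorem alt_good (k : Int) : GoodN k (n_comb2n_alt k) := by
  unfold n_comb2n_alt
  split
  · exact ⟨le_refl 1, by omega, Or.inl rfl⟩
  · rename_i h0
    have hk1 : 1 ≤ k := by omega
    have hr := isqrt_ge_one (8 * k - 7) (by omega)
    have hn0 : 1 ≤ PySem.Int.floordiv (1 + pv_isqrt (8 * k - 7)) 2 := by
      rw [pv_fd2]; omega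
    have hup := pv_up_good k k.toNat (PySem.Int.floordiv (1 + pv_isqrt (8 * k - 7)) 2) hn0 ?_
    · exact pv_down_good k _ _ hup.1 hup.2 (le_refl _)
    · set n0 := PySem.Int.floordiv (1 + pv_isqrt (8 * k - 7)) 2 with hn0def
      have hcast : ((k.toNat : Int)) = k := Int.toNat_of_nonneg (by omega)
      have hb : k + 1 ≤ n0 + k.toNat := by omega
      have hm := comb_mono (a := k + 1) (b := n0 + k.toNat) (by omega) hb
      have he : (k + 1) * (k + 1 - 1) = k * k + k := by ring
      have hk2 : k ≤ (k + 1) * (k + 1 - 1) / 2 := by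
        rw [he]
        have : k ≤ k * k := by nlinarith
        omega
      omega

-- ===== VERDICT (by name: the statement is the Claim_ definition above) =====
theorem n_comb2n_spec : Claim_equal_n_comb2n := by
  intro k hdom
  unfold Spec_n_comb2n
  have hd : k ≤ 2147483648 := by
    simp only [Dom_n_comb2n, pvDomInt, decide_eq_true_eq] at hdom
    exact hdom.2
  have hA : GoodN k (n_comb2n k) := by
    unfold n_comb2n
    apply loopA_good k 262143 1 262144 (le_refl 1) (by norm_num) (by norm_num)
    · intro m h1 h2; omega
    · omega
  exact GoodN_unique hA (alt_good k)
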